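-- pv_equiv track=rewrite | github.com/rafaturRakin/PythonCodes | Basic/Exercise57.py | arrange_characters
-- ===== SOURCE A (Python) =====
-- def arrange_characters(string):
--     lower, upper = ["", ""]
--     for x in string:
--         if x.islower():
--             lower += x
--         else:
--             upper += x
--     return lower + upper
-- ===== SOURCE B (Python) =====
-- def arrange_characters(string):
--     return ''.join(sorted(string, key=lambda c: not c.islower()))
-- ===== Notes on version B (the rewrite author's own statement) =====
-- stated objective: idiomatic
-- what changed: Replaces A's explicit two-accumulator partition loop with a one-liner: a single stable sort keyed on not-lowercase, so lowercase chars come first with original order preserved in each group.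
import Mathlib
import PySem

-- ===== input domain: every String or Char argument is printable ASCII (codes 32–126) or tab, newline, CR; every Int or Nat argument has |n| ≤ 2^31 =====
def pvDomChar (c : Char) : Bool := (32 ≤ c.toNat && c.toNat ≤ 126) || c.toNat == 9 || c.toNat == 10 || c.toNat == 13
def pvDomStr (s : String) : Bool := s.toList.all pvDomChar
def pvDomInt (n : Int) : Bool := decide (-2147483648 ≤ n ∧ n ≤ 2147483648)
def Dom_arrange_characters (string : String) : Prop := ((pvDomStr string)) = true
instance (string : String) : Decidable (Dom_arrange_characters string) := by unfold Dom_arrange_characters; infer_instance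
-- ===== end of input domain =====

-- ===== PORT A =====
-- A: one pass over the string with two string accumulators (lower, upper), returning lower + upper.
def arrange_characters (string : String) : String :=
  let p := string.toList.foldl
    (fun (p : List Char × List Char) x =>
      if PySem.Chars.islower x then (p.1 ++ [x], p.2) else (p.1, p.2 ++ [x]))
    ([], [])
  String.mk (p.1 ++ p.2)

-- ===== PORT B =====
-- B (idiomatic): ''.join(sorted(string, key=lambda c: not c.islower())) — stable sort on the
-- boolean key (False = 0 for lowercase, True = 1 otherwise), lowercase group first.
def arrange_characters_alt (string : String) : String :=
  String.mk (PySem.List.sorted string.toList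
    (fun c => if PySem.Chars.islower c then (0 : Int) else 1) false)

-- ===== PRECONDITION & SPEC =====
def Spec_arrange_characters (string : String) (out : String) : Prop := out = arrange_characters_alt string
instance (string : String) (out : String) : Decidable (Spec_arrange_characters string out) := by unfold Spec_arrange_characters; infer_instance

-- ===== CLAIM (what is proved, stated in full; the proofs are below) =====
def Claim_equal_arrange_characters : Prop := ∀ (string : String), Dom_arrange_characters string → Spec_arrange_characters string (arrange_characters string)

-- ===== LEMMAS AND PROOFS =====

-- insertBy puts x exactly at the boundary when it is not-before every element of L and before every element of H
theorem insertBy_boundary (before : Char → Char → Bool) (x : Char) (L H : List Char)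
    (hL : ∀ y ∈ L, before x y = false) (hH : ∀ y ∈ H, before x y = true) :
    PySem.List.insertBy before x (L ++ H) = L ++ x :: H := by
  induction L with
  | nil =>
    cases H with
    | nil => simp [PySem.List.insertBy]
    | cons h t => simp [PySem.List.insertBy, hH h (by simp)]
  | cons a L ih =>
    simp only [List.cons_append, PySem.List.insertBy, hL a (by simp), Bool.false_eq_true,
      if_false, List.cons.injEq, true_and]
    exact ih (fun y hy => hL y (by simp [hy]))

-- the insertion-sort fold with the 0/1 key is a stable partition
theorem sortFold_partition (xs L H : List Char)
    (hL : ∀ y ∈ L, PySem.Chars.islower y = true) (hH : ∀ y ∈ H, PySem.Chars.islower y = false) :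
    xs.foldl (fun acc x => PySem.List.insertBy
        (fun a b => decide ((if PySem.Chars.islower a then (0 : Int) else 1) <
                            (if PySem.Chars.islower b then (0 : Int) else 1))) x acc) (L ++ H)
      = (L ++ xs.filter (fun c => PySem.Chars.islower c))
        ++ (H ++ xs.filter (fun c => !PySem.Chars.islower c)) := by
  induction xs generalizing L H with
  | nil => simp
  | cons x xs ih =>
    by_cases hx : PySem.Chars.islower x = true
    · have hins : PySem.List.insertBy
          (fun a b => decide ((if PySem.Chars.islower a then (0 : Int) else 1) <
                              (if PySem.Chars.islower b then (0 : Int) else 1))) x (L ++ H)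
          = (L ++ [x]) ++ H := by
        rw [insertBy_boundary]
        · simp
        · intro y hy; simp [hx, hL y hy]
        · intro y hy; simp [hx, hH y hy]
      have hL' : ∀ y ∈ L ++ [x], PySem.Chars.islower y = true := by
        intro y hy
        rcases List.mem_append.1 hy with h | h
        · exact hL y h
        · simp at h; exact h ▸ hx
      simp only [List.foldl_cons, hins]
      rw [ih (L ++ [x]) H hL' hH]
      simp [hx, List.append_assoc]
    · have hx' : PySem.Chars.islower x = false := by simpa using hx
      have hins : PySem.List.insertBy
          (fun a b => decide ((if PySem.Chars.islower a then (0 : Int) else 1) <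
                              (if PySem.Chars.islower b then (0 : Int) else 1))) x (L ++ H)
          = L ++ (H ++ [x]) := by
        rw [← List.append_assoc]
        apply PySem.List.insertBy_of_forall_not_before
        intro y hy
        rcases List.mem_append.1 hy with h | h
        · simp [hx', hL y h]
        · simp [hx', hH y h]
      have hH' : ∀ y ∈ H ++ [x], PySem.Chars.islower y = false := by
        intro y hy
        rcases List.mem_append.1 hy with h | h
        · exact hH y h
        · simp at h; exact h ▸ hx'
      simp only [List.foldl_cons, hins]
      rw [ih L (H ++ [x]) hL hH']
      simp [hx', List.append_assoc]

-- A's fold is the same stable partition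
theorem afold_partition (xs l u : List Char) :
    xs.foldl (fun (p : List Char × List Char) x =>
        if PySem.Chars.islower x then (p.1 ++ [x], p.2) else (p.1, p.2 ++ [x])) (l, u)
      = (l ++ xs.filter (fun c => PySem.Chars.islower c),
         u ++ xs.filter (fun c => !PySem.Chars.islower c)) := by
  induction xs generalizing l u with
  | nil => simp
  | cons x xs ih =>
    by_cases hx : PySem.Chars.islower x = true
    · simp [hx, ih, List.append_assoc]
    · have hx' : PySem.Chars.islower x = false := by simpa using hx
      simp [hx', ih, List.append_assoc]

-- ===== VERDICT (by name: the statement is the Claim_ definition above) =====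
theorem arrange_characters_spec : Claim_equal_arrange_characters := by
  intro s _
  unfold Spec_arrange_characters arrange_characters arrange_characters_alt
  rw [PySem.List.sorted_eq_foldl_insertBy]
  have h1 := afold_partition s.toList [] []
  have h2 := sortFold_partition s.toList [] [] (by simp) (by simp)
  simp only [List.nil_append] at h1 h2
  simp [h1, h2]
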